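-- pv_equiv track=rewrite | github.com/zenoma/advent-of-code | 2021/day-04/main.py | check_bingo
-- ===== SOURCE A (Python) =====
-- def check_bingo(board):
--     for row in board:
--         if all(element == -1 for element in row):
--             return True
--
--     num_columns = len(board[0])
--     for col in range(num_columns):
--         if all(row[col] == -1 for row in board):
--             return True
--     return False
-- ===== SOURCE B (Python) =====
-- def check_bingo(board):
--     n_rows = len(board)
--     full_row = False
--     col_count = {}
--     for row in board:
--         hits = 0
--         for j, x in enumerate(row):
--             if x == -1:
--                 hits += 1
--                 col_count[j] = col_count.get(j, 0) + 1
--         full_row = full_row or hits == len(row)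
--     return full_row or any(c == n_rows for c in col_count.values())
-- ===== Notes on version B (the rewrite author's own statement) =====
-- stated objective: alternative
-- what changed: Replaces A's two nested all()-scans (per-row scan, then per-column scan via repeated indexing) with a single pass over all cells that tallies -1 hits per row and per column in counters, followed by a threshold check.
-- crash fix: A raises IndexError on the empty board (board[0]) and on jagged boards whose column scan reaches a too-short row before a non-(-1) cell; B returns the bingo verdict of the cells that exist (False at the raise witness []). — e.g. on check_bingo([]): A raises IndexError, B returns false
import Mathlib
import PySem

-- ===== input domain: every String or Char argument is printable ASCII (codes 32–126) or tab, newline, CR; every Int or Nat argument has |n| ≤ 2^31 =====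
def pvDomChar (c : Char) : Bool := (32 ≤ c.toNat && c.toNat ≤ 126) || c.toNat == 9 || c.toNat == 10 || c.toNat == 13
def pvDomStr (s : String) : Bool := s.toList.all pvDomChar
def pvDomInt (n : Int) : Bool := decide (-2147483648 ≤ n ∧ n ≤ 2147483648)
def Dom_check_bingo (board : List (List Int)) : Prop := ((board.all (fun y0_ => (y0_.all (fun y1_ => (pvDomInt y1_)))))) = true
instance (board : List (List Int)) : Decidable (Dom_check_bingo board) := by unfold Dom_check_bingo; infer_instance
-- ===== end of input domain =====

-- B replaces A's two nested all()-scans (rows, then columns via repeated indexing) by one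
-- pass over the cells that tallies -1 hits per row and per column; same return value (alternative decomposition).

-- ===== PORT A =====
def check_bingo (board : List (List Int)) : Bool :=
  if board.any (fun row => row.all (fun e => e == -1)) then
    true
  else
    -- board[0]: the IndexError on an empty board is excluded by Pre_check_bingo
    let num_columns := (board.headD []).length
    (PySem.List.pyRange 0 (num_columns : Int) 1).any (fun col =>
      -- row[col]: runs that reach an IndexError are excluded by Pre_check_bingo;
      -- in range pyGetD is exactly row[col], and the default 0 never equals -1
      board.all (fun row => PySem.List.pyGetD row col 0 == -1))

-- ===== PORT B =====
def check_bingo_alt (board : List (List Int)) : Bool :=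
  let n_rows := board.length
  let st := board.foldl
    (fun (st : Bool × PySem.Dict Int Int) row =>
      let q := (PySem.List.enumerate row 0).foldl
        (fun (q : Int × PySem.Dict Int Int) jx =>
          if jx.2 == -1 then (q.1 + 1, q.2.modify jx.1 0 (· + 1)) else q)
        ((0 : Int), st.2)
      (st.1 || (q.1 == (row.length : Int)), q.2))
    (false, PySem.Dict.empty)
  st.1 || st.2.values.any (fun c => c == (n_rows : Int))

-- ===== PRECONDITION & SPEC =====
-- helpers describing A's column scan on the raw input (row k = board.getD k [])
def pvHit (board : List (List Int)) (c k : Nat) : Prop :=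
  c < (board.getD k []).length ∧ (board.getD k []).getD c 0 = -1
-- column c's scan stops at a non-(-1) in-range cell (the all() returns False)
def pvColFalse (board : List (List Int)) (c : Nat) : Prop :=
  ∃ i < board.length, c < (board.getD i []).length ∧ (board.getD i []).getD c 0 ≠ -1 ∧
    ∀ k < i, pvHit board c k
-- column c's scan reaches a too-short row before any non-(-1) cell (IndexError)
def pvColRaise (board : List (List Int)) (c : Nat) : Prop :=
  ∃ i < board.length, (board.getD i []).length ≤ c ∧ ∀ k < i, pvHit board c k
def pvFullRow (board : List (List Int)) : Prop := ∃ r ∈ board, ∀ x ∈ r, x = -1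
-- exactly the inputs on which Python A raises IndexError: the empty board, or (no full -1 row and)
-- some column whose scan hits a too-short row while every earlier column scan returned False
def pvARaises (board : List (List Int)) : Prop :=
  board = [] ∨ (¬ pvFullRow board ∧
    ∃ c < (board.headD []).length, pvColRaise board c ∧ ∀ c' < c, pvColFalse board c')

-- Pre_ excludes EXACTLY the inputs where Python A raises IndexError (empty board; jagged boards
-- whose column scan reaches a too-short row first); on every input where A returns, Pre_ holds.
def Pre_check_bingo (board : List (List Int)) : Prop := ¬ pvARaises board
instance (board : List (List Int)) : Decidable (Pre_check_bingo board) := by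
  unfold Pre_check_bingo pvARaises pvFullRow pvColRaise pvColFalse pvHit; infer_instance

def pvWitness_check_bingo : List (List Int) := [[0, -1], [-1, -1]]

-- On the inputs of Raises_ (= exactly where A raises IndexError) B returns the bingo verdict of the
-- cells that exist: False unless a completed row/column is present.
def Raises_check_bingo (board : List (List Int)) : Prop := pvARaises board
instance (board : List (List Int)) : Decidable (Raises_check_bingo board) := by
  unfold Raises_check_bingo pvARaises pvFullRow pvColRaise pvColFalse pvHit; infer_instance
def pvRaiseWitness_check_bingo : List (List Int) := []
def pvRaiseWitnessOut_check_bingo : Bool := false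

def Spec_check_bingo (board : List (List Int)) (out : Bool) : Prop := out = check_bingo_alt board
instance (board : List (List Int)) (out : Bool) : Decidable (Spec_check_bingo board out) := by unfold Spec_check_bingo; infer_instance

-- ===== CLAIM (what is proved, stated in full; the proofs are below) =====
def Claim_equal_check_bingo : Prop := ∀ (board : List (List Int)), Dom_check_bingo board → Pre_check_bingo board → Spec_check_bingo board (check_bingo board)
def Claim_raises_check_bingo : Prop := (∀ (board : List (List Int)), Dom_check_bingo board → Raises_check_bingo board → ¬ Pre_check_bingo board) ∧ (Dom_check_bingo (pvRaiseWitness_check_bingo) ∧ Raises_check_bingo (pvRaiseWitness_check_bingo) ∧ check_bingo_alt (pvRaiseWitness_check_bingo) = pvRaiseWitnessOut_check_bingo)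

-- ===== LEMMAS AND PROOFS =====

def hitsIdx (row : List Int) : List Int :=
  ((PySem.List.enumerate row 0).filter (fun jx => jx.2 == -1)).map (·.1)

theorem hitsIdx_nodup (row : List Int) : (hitsIdx row).Nodup := by
  have h := PySem.List.pairwise_lt_enumerate row (0:Int)
  have h2 := List.Pairwise.filter (p := fun jx => jx.2 == -1) h
  have h3 : (hitsIdx row).Pairwise (· < ·) := by
    unfold hitsIdx
    exact (List.pairwise_map).2 h2
  exact h3.imp (fun hlt => ne_of_lt hlt)

theorem mem_hitsIdx (row : List Int) (k : Int) :
    k ∈ hitsIdx row ↔ 0 ≤ k ∧ k.toNat < row.length ∧ row.getD k.toNat 0 = -1 := by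
  unfold hitsIdx
  simp only [List.mem_map, List.mem_filter, PySem.List.mem_enumerate_iff]
  constructor
  · rintro ⟨⟨j, x⟩, ⟨⟨m, hm, heq⟩, hx⟩, hk⟩
    simp only [Prod.mk.injEq] at heq
    obtain ⟨hj, hxv⟩ := heq
    simp only at hk
    subst hk hj hxv
    simp only [zero_add, beq_iff_eq] at hx ⊢
    refine ⟨Int.natCast_nonneg m, ?_, ?_⟩
    · simpa using hm
    · simpa [List.getD_eq_getElem?_getD, List.getElem?_eq_getElem hm] using hx
  · rintro ⟨h0, hlt, hv⟩
    refine ⟨(k, row[k.toNat]), ⟨⟨k.toNat, hlt, by simp [h0]⟩, ?_⟩, rfl⟩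
    simp only [beq_iff_eq]
    rw [List.getD_eq_getElem?_getD, List.getElem?_eq_getElem hlt] at hv
    simpa using hv

theorem inner_eq (row : List Int) (d : PySem.Dict Int Int) :
    (PySem.List.enumerate row 0).foldl
        (fun (q : Int × PySem.Dict Int Int) jx =>
          if jx.2 == -1 then (q.1 + 1, q.2.modify jx.1 0 (· + 1)) else q)
        ((0 : Int), d)
      = ((row.count (-1) : Int),
         (hitsIdx row).foldl (fun d k => d.modify k 0 (· + 1)) d) := by
  have hstep : (fun (q : Int × PySem.Dict Int Int) jx =>
          if jx.2 == -1 then (q.1 + 1, q.2.modify jx.1 0 (· + 1)) else q)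
      = fun q jx => ((fun (a : Int) (jx : Int × Int) => if jx.2 == -1 then a + 1 else a) q.1 jx,
                     (fun (e : PySem.Dict Int Int) (jx : Int × Int) =>
                        if jx.2 == -1 then e.modify jx.1 0 (· + 1) else e) q.2 jx) := by
    funext q jx; by_cases h : jx.2 == -1 <;> simp [h]
  rw [hstep, PySem.List.foldl_prod_mk
      (f := fun (a : Int) (jx : Int × Int) => if jx.2 == -1 then a + 1 else a)
      (g := fun (e : PySem.Dict Int Int) (jx : Int × Int) =>
              if jx.2 == -1 then e.modify jx.1 0 (· + 1) else e)]
  simp only [Prod.mk.injEq]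
  refine ⟨?_, ?_⟩
  · have h1 : (PySem.List.enumerate row 0).foldl
        (fun (a : Int) (jx : Int × Int) => if jx.2 == -1 then a + 1 else a) 0
        = ((PySem.List.enumerate row 0).map (·.2)).foldl
            (fun (a : Int) x => if x == -1 then a + 1 else a) 0 :=
      (List.foldl_map (f := fun (jx : Int × Int) => jx.2)
        (g := fun (a : Int) (x : Int) => if x == -1 then a + 1 else a)).symm
    rw [h1, PySem.List.map_snd_enumerate, PySem.List.foldl_beq_add_one, zero_add]
  · rw [PySem.List.foldl_if_eq_foldl_filter]
    unfold hitsIdx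
    exact (List.foldl_map (f := fun (jx : Int × Int) => jx.1)
      (g := fun (e : PySem.Dict Int Int) k => e.modify k 0 (· + 1))).symm

theorem outer_eq' (rows : List (List Int)) (b : Bool) (d : PySem.Dict Int Int) :
    rows.foldl
        (fun (st : Bool × PySem.Dict Int Int) row =>
          (st.1 || ((row.count (-1) : Int) == (row.length : Int)),
           (hitsIdx row).foldl (fun d k => d.modify k 0 (· + 1)) st.2))
        (b, d)
      = (b || rows.any (fun row => (row.count (-1) : Int) == (row.length : Int)),
         (rows.flatMap hitsIdx).foldl (fun d k => d.modify k 0 (· + 1)) d) := by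
  induction rows generalizing b d with
  | nil => simp
  | cons r rest ih =>
    rw [List.foldl_cons, ih]
    simp [Bool.or_assoc]

theorem outer_eq (rows : List (List Int)) (b : Bool) (d : PySem.Dict Int Int) :
    rows.foldl
        (fun (st : Bool × PySem.Dict Int Int) row =>
          let q := (PySem.List.enumerate row 0).foldl
            (fun (q : Int × PySem.Dict Int Int) jx =>
              if jx.2 == -1 then (q.1 + 1, q.2.modify jx.1 0 (· + 1)) else q)
            ((0 : Int), st.2)
          (st.1 || (q.1 == (row.length : Int)), q.2))
        (b, d)
      = (b || rows.any (fun row => (row.count (-1) : Int) == (row.length : Int)),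
         (rows.flatMap hitsIdx).foldl (fun d k => d.modify k 0 (· + 1)) d) := by
  rw [← outer_eq']
  apply PySem.List.foldl_congr_mem
  intro st row _
  simp only [inner_eq]

theorem count_flatMap_hits (board : List (List Int)) (k : Int) :
    (board.flatMap hitsIdx).count k
      = board.countP (fun row => decide (k ∈ hitsIdx row)) := by
  induction board with
  | nil => rfl
  | cons r rest ih =>
    simp only [List.flatMap_cons, List.count_append, List.countP_cons, ih]
    by_cases h : k ∈ hitsIdx r
    · rw [List.count_eq_one_of_mem (hitsIdx_nodup r) h]
      simp [h, Nat.add_comm]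
    · rw [List.count_eq_zero_of_not_mem h]
      simp [h]

theorem full_eq (row : List Int) :
    (row.all (fun e => e == -1)) = ((row.count (-1) : Int) == (row.length : Int)) := by
  rw [Bool.eq_iff_iff]
  simp only [List.all_eq_true, beq_iff_eq, Nat.cast_inj]
  rw [List.count_eq_length]
  constructor
  · exact fun h b hb => (h b hb).symm
  · exact fun h b hb => (h b hb).symm

theorem pyhit (row : List Int) (c : Int) (h0 : 0 ≤ c) :
    ((PySem.List.pyGetD row c 0 == -1) = true) ↔ c ∈ hitsIdx row := by
  rw [mem_hitsIdx, PySem.List.pyGetD_of_nonneg row 0 h0]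
  by_cases hlt : c.toNat < row.length
  · simp [hlt, h0]
  · rw [List.getD_eq_getElem?_getD, List.getElem?_eq_none (by omega)]
    simp [hlt]


theorem alt_char (board : List (List Int)) :
    check_bingo_alt board
      = (board.any (fun row => row.all (fun e => e == -1))
         || (PySem.Set.ofList (board.flatMap hitsIdx)).any
              (fun k => (((board.flatMap hitsIdx).count k : Int)) == (board.length : Int))) := by
  unfold check_bingo_alt
  simp only [outer_eq, Bool.false_or]
  have hfull : (board.any fun row => (↑(List.count (-1) row) : Int) == (↑row.length : Int))
      = board.any (fun row => row.all (fun e => e == -1)) :=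
    PySem.List.any_congr_mem (fun row _ => (full_eq row).symm)
  rw [hfull]
  have hnd : ((board.flatMap hitsIdx).foldl
      (fun d k => d.modify k 0 (· + 1)) (PySem.Dict.empty : PySem.Dict Int Int)).keys.Nodup :=
    PySem.Dict.nodup_keys_foldl_modify_key (board.flatMap hitsIdx) (fun k => k) 0
      (fun _ _ => (· + 1)) PySem.Dict.empty (by simp [PySem.Dict.keys_empty])
  rw [PySem.Dict.values_eq_map_keys _ hnd 0, List.any_map]
  have hkeys : ((board.flatMap hitsIdx).foldl
      (fun d k => d.modify k 0 (· + 1)) (PySem.Dict.empty : PySem.Dict Int Int)).keys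
      = PySem.Set.ofList (board.flatMap hitsIdx) := by
    rw [PySem.Dict.keys_foldl_modify (f := fun _ _ => (· + 1))]
    rw [PySem.Set.ofList_eq_foldl]
    simp [PySem.Set.update, PySem.Dict.keys_empty]
  rw [hkeys]
  refine congrArg (fun x => (board.any fun row => row.all fun e => e == -1) || x) ?_
  apply PySem.List.any_congr_mem
  intro k _
  simp only [Function.comp_apply, PySem.Dict.getD_foldl_modify_add_one,
    PySem.Dict.getD_empty, zero_add]

theorem a_char (board : List (List Int)) :
    check_bingo board
      = (board.any (fun row => row.all (fun e => e == -1))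
         || (PySem.List.pyRange 0 (((board.headD []).length : Nat) : Int) 1).any (fun col =>
              board.all (fun row => PySem.List.pyGetD row col 0 == -1))) := by
  unfold check_bingo
  by_cases h : board.any (fun row => row.all (fun e => e == -1)) <;> simp [h]

theorem second_eq (board : List (List Int)) :
    ((PySem.List.pyRange 0 (((board.headD []).length : Nat) : Int) 1).any (fun col =>
        board.all (fun row => PySem.List.pyGetD row col 0 == -1)))
      = ((PySem.Set.ofList (board.flatMap hitsIdx)).any
           (fun k => (((board.flatMap hitsIdx).count k : Int)) == (board.length : Int))) := by
  rcases board with _ | ⟨r0, rest⟩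
  · rfl
  · rw [Bool.eq_iff_iff]
    simp only [List.any_eq_true, List.all_eq_true]
    constructor
    · rintro ⟨c, hc, hall⟩
      have hc' := PySem.List.mem_pyRange_one.1 hc
      have h0 : (0 : Int) ≤ c := hc'.1
      have hmem : ∀ row ∈ r0 :: rest, c ∈ hitsIdx row :=
        fun row hr => (pyhit row c h0).1 (hall row hr)
      refine ⟨c, ?_, ?_⟩
      · exact (PySem.Set.mem_ofList _ _).2
          (List.mem_flatMap.2 ⟨r0, List.mem_cons_self .., hmem r0 (List.mem_cons_self ..)⟩)
      · rw [count_flatMap_hits]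
        have := List.countP_eq_length.2
          (fun row hr => decide_eq_true (hmem row hr))
        simp [this]
    · rintro ⟨k, hk, hcount⟩
      have hkH : k ∈ (r0 :: rest).flatMap hitsIdx := (PySem.Set.mem_ofList _ _).1 hk
      obtain ⟨row₀, _, hk₀⟩ := List.mem_flatMap.1 hkH
      have h0 : (0 : Int) ≤ k := ((mem_hitsIdx _ _).1 hk₀).1
      rw [count_flatMap_hits] at hcount
      have hcnt : ((r0 :: rest).countP (fun row => decide (k ∈ hitsIdx row)))
          = (r0 :: rest).length := by
        have := beq_iff_eq.1 hcount
        exact_mod_cast this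
      have hmem : ∀ row ∈ r0 :: rest, k ∈ hitsIdx row :=
        fun row hr => of_decide_eq_true (List.countP_eq_length.1 hcnt row hr)
      have hr0 := (mem_hitsIdx r0 k).1 (hmem r0 (List.mem_cons_self ..))
      refine ⟨k, PySem.List.mem_pyRange_one.2 ⟨h0, ?_⟩, ?_⟩
      · have := hr0.2.1
        simp only [List.headD_cons]
        omega
      · exact fun row hr => (pyhit row k h0).2 (hmem row hr)

theorem ports_agree (board : List (List Int)) : check_bingo board = check_bingo_alt board := by
  rw [a_char, alt_char, second_eq]

-- ===== VERDICT (by name: the statement is the Claim_ definition above) =====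
theorem check_bingo_spec : Claim_equal_check_bingo := by
  intro board _ _
  unfold Spec_check_bingo
  exact ports_agree board

theorem check_bingo_raises : Claim_raises_check_bingo := by
  unfold Claim_raises_check_bingo
  exact ⟨fun board _ h hp => hp h, by decide⟩

-- self-check: reads B's value at the raise witness off check_bingo_raises
theorem pvRaiseWitness_ok :
    check_bingo_alt pvRaiseWitness_check_bingo = pvRaiseWitnessOut_check_bingo :=
  check_bingo_raises.2.2.2
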